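-- pv_equiv track=rewrite | github.com/jax-ml/jax | tests/xmap_test.py | axis_matchings
-- ===== SOURCE A (Python) =====
-- def axis_matchings(lhs_shape, rhs_shape):
--   def helper(start, exc1, exc2):
--     yield ()
--     for i in range(start, len(lhs_shape)):
--       d1 = lhs_shape[i]
--       if i not in exc1:
--         for j, d2 in enumerate(rhs_shape):
--           if d1 == d2 and j not in exc2:
--             for matches in helper(i + 1, exc1 | {i}, exc2 | {j}):
--               yield ((i, j), *matches)
--   return helper(0, set(), set())
-- ===== SOURCE B (Python) =====
-- def axis_matchings(lhs_shape, rhs_shape):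
--   # Iterative depth-first enumeration with an explicit stack instead of recursion.
--   # (The recursion's exc1 set is redundant: every index scanned is >= start,
--   # hence never previously used, so frames carry only (start, exc2, prefix).)
--   stack = [(0, frozenset(), ())]
--   while stack:
--     start, exc2, prefix = stack.pop()
--     yield prefix
--     children = []
--     for i in range(start, len(lhs_shape)):
--       d1 = lhs_shape[i]
--       for j, d2 in enumerate(rhs_shape):
--         if d1 == d2 and j not in exc2:
--           children.append((i + 1, exc2 | {j}, prefix + ((i, j),)))
--     stack.extend(reversed(children))
-- ===== Notes on version B (the rewrite author's own statement) =====
-- stated objective: alternative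
-- what changed: Replaces the recursive generator by an iterative depth-first enumeration with an explicit stack of (start, exc2, prefix) frames (yield on pop, push children in reverse), dropping the redundant exc1 set; same pre-order output sequence.
import Mathlib
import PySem

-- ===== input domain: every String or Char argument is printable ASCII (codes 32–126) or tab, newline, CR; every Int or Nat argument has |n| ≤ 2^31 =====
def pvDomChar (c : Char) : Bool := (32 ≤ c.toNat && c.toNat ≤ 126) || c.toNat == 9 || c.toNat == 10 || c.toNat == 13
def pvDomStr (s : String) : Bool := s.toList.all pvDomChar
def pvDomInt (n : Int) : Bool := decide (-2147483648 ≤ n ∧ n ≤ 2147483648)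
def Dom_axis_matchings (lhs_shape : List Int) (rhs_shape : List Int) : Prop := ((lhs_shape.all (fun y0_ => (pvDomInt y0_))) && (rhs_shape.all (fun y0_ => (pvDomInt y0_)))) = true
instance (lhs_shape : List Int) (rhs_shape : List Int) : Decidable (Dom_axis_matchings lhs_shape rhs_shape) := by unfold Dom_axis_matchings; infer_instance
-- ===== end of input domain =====

-- B replaces the recursive generator by an iterative explicit-stack depth-first
-- enumeration (and drops the provably redundant exc1 set); objective: alternative
-- decomposition, same output sequence. Both return the full list of yields.

-- ===== PORT A =====
-- A's recursive generator `helper(start, exc1, exc2)`; the fuel argument is a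
-- totality guard only (`lhs.length` is always sufficient, since recursion moves
-- `start` past `i ≥ start`).  `range(start, len(lhs_shape))` is ported by hand as
-- `List.range' start (lhs.length - start)` (exact: start, i are nonnegative);
-- `lhs.getD i 0` is exact for `lhs_shape[i]` since every generated i is in range.
def pvA_helper (lhs rhs : List Int) : Nat → Nat → List Nat → List Int → List (List (Int × Int))
  | 0, _, _, _ => [[]]
  | fuel+1, start, exc1, exc2 =>
    [] :: (List.range' start (lhs.length - start)).flatMap (fun i =>
      if i ∈ exc1 then [] else
        (PySem.List.enumerate rhs).flatMap (fun jd =>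
          if lhs.getD i 0 = jd.2 ∧ jd.1 ∉ exc2 then
            (pvA_helper lhs rhs fuel (i+1) (i :: exc1) (jd.1 :: exc2)).map
              (fun m => (((i : Int), jd.1)) :: m)
          else []))

def axis_matchings (lhs_shape : List Int) (rhs_shape : List Int) : List (List (Int × Int)) :=
  pvA_helper lhs_shape rhs_shape lhs_shape.length 0 [] []

-- ===== PORT B =====
-- the `children` list built inside one iteration of Source B's while loop
def pvB_children (lhs rhs : List Int) (start : Nat) (exc2 : List Int)
    (pre : List (Int × Int)) : List (Nat × List Int × List (Int × Int)) :=
  (List.range' start (lhs.length - start)).flatMap (fun i =>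
    (PySem.List.enumerate rhs).flatMap (fun jd =>
      if lhs.getD i 0 = jd.2 ∧ jd.1 ∉ exc2 then
        [(i+1, jd.1 :: exc2, pre ++ [(((i : Int), jd.1))])]
      else []))

-- Source B's while loop; the stack is a Lean list with its head as the top (Python's
-- `pop()` from the end after `extend(reversed(children))` = pop the head after
-- prepending `children`).  The fuel is a totality guard: it is one unit per pop,
-- and `axis_matchings_alt` passes the exact number of pops (`pvB_size`).
def pvB_run (lhs rhs : List Int) :
    Nat → List (Nat × List Int × List (Int × Int)) → List (List (Int × Int))
  | 0, _ => []
  | _+1, [] => []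
  | fuel+1, (start, exc2, pre) :: rest =>
      pre :: pvB_run lhs rhs fuel (pvB_children lhs rhs start exc2 pre ++ rest)

-- number of nodes of the search tree rooted at (start, exc2) = number of pops
def pvB_size (lhs rhs : List Int) : Nat → Nat → List Int → Nat
  | 0, _, _ => 1
  | fuel+1, start, exc2 =>
    1 + ((List.range' start (lhs.length - start)).map (fun i =>
      ((PySem.List.enumerate rhs).map (fun jd =>
        if lhs.getD i 0 = jd.2 ∧ jd.1 ∉ exc2 then
          pvB_size lhs rhs fuel (i+1) (jd.1 :: exc2)
        else 0)).sum)).sum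

def axis_matchings_alt (lhs_shape : List Int) (rhs_shape : List Int) : List (List (Int × Int)) :=
  pvB_run lhs_shape rhs_shape (pvB_size lhs_shape rhs_shape lhs_shape.length 0 []) [(0, [], [])]

-- ===== PRECONDITION & SPEC =====
def Spec_axis_matchings (lhs_shape : List Int) (rhs_shape : List Int) (out : List (List (Int × Int))) : Prop := out = axis_matchings_alt lhs_shape rhs_shape
instance (lhs_shape : List Int) (rhs_shape : List Int) (out : List (List (Int × Int))) : Decidable (Spec_axis_matchings lhs_shape rhs_shape out) := by unfold Spec_axis_matchings; infer_instance

-- ===== CLAIM (what is proved, stated in full; the proofs are below) =====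
def Claim_equal_axis_matchings : Prop := ∀ (lhs_shape : List Int) (rhs_shape : List Int), Dom_axis_matchings lhs_shape rhs_shape → Spec_axis_matchings lhs_shape rhs_shape (axis_matchings lhs_shape rhs_shape)

-- ===== LEMMAS AND PROOFS =====

-- the full subtree enumeration of one stack frame, at canonical fuel
def pvGen (lhs rhs : List Int) (f : Nat × List Int × List (Int × Int)) : List (List (Int × Int)) :=
  (pvA_helper lhs rhs lhs.length f.1 [] f.2.1).map (f.2.2 ++ ·)

-- (a) exc1 is redundant: any exc1 whose members lie below start is equivalent to ∅
theorem pvA_exc1_irrel (lhs rhs : List Int) :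
    ∀ (fuel start : Nat) (exc1 : List Nat) (exc2 : List Int),
      (∀ x ∈ exc1, x < start) →
      pvA_helper lhs rhs fuel start exc1 exc2 = pvA_helper lhs rhs fuel start [] exc2 := by
  intro fuel
  induction fuel with
  | zero => intro _ _ _ _; rfl
  | succ fuel ih =>
    intro start exc1 exc2 hlt
    simp only [pvA_helper]
    congr 1
    apply List.flatMap_congr
    intro i hi
    obtain ⟨k, hk, hik⟩ := List.mem_range'.mp hi
    have hni : i ∉ exc1 := fun h => absurd (hlt i h) (by omega)
    simp only [hni, if_false, List.not_mem_nil, if_false]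
    apply List.flatMap_congr
    intro jd _
    by_cases hc : lhs.getD i 0 = jd.2 ∧ jd.1 ∉ exc2
    · simp only [hc]
      rw [ih (i+1) (i :: exc1) (jd.1 :: exc2)
            (by intro x hx; simp only [List.mem_cons] at hx
                rcases hx with rfl | hx
                · omega
                · have := hlt _ hx; omega),
          ih (i+1) [i] (jd.1 :: exc2)
            (by intro x hx; simp only [List.mem_cons, List.not_mem_nil, or_false] at hx; omega)]
    · simp only [hc, if_false]

-- (d) fuel stability: any fuel ≥ lhs.length - start gives the same result
theorem pvA_fuel_stable (lhs rhs : List Int) :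
    ∀ (f f' start : Nat) (exc1 : List Nat) (exc2 : List Int),
      lhs.length - start ≤ f → lhs.length - start ≤ f' →
      pvA_helper lhs rhs f start exc1 exc2 = pvA_helper lhs rhs f' start exc1 exc2 := by
  intro f
  induction f with
  | zero =>
    intro f' start exc1 exc2 h _
    cases f' with
    | zero => rfl
    | succ f' =>
      have : lhs.length - start = 0 := Nat.le_zero.1 h
      simp [pvA_helper, this]
  | succ f ih =>
    intro f' start exc1 exc2 h h'
    cases f' with
    | zero =>
      have : lhs.length - start = 0 := Nat.le_zero.1 h'
      simp [pvA_helper, this]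
    | succ f' =>
      simp only [pvA_helper]
      congr 1
      apply List.flatMap_congr
      intro i hi
      obtain ⟨k, hk, hik⟩ := List.mem_range'.mp hi
      have hfi : lhs.length - (i+1) ≤ f := by omega
      have hfi' : lhs.length - (i+1) ≤ f' := by omega
      by_cases he : i ∈ exc1
      · simp [he]
      · simp only [he, if_false]
        apply List.flatMap_congr
        intro jd _
        by_cases hc : lhs.getD i 0 = jd.2 ∧ jd.1 ∉ exc2
        · simp only [hc]
          rw [ih f' (i+1) (i :: exc1) (jd.1 :: exc2) hfi hfi']
        · simp only [hc, if_false]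

-- (b) pvB_size counts exactly the yields of the corresponding subtree
theorem pvB_size_eq_length (lhs rhs : List Int) :
    ∀ (fuel start : Nat) (exc2 : List Int),
      pvB_size lhs rhs fuel start exc2 = (pvA_helper lhs rhs fuel start [] exc2).length := by
  intro fuel
  induction fuel with
  | zero => intro _ _; rfl
  | succ fuel ih =>
    intro start exc2
    simp only [pvB_size, pvA_helper, List.length_cons, List.length_flatMap]
    rw [Nat.add_comm]
    congr 2
    apply List.map_congr_left
    intro i _
    simp only [List.not_mem_nil, if_false, List.length_flatMap]
    congr 1
    apply List.map_congr_left
    intro jd _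
    by_cases hc : lhs.getD i 0 = jd.2 ∧ jd.1 ∉ exc2
    · rw [if_pos hc, if_pos hc, List.length_map, ih (i+1) (jd.1 :: exc2),
          pvA_exc1_irrel lhs rhs fuel (i+1) [i] (jd.1 :: exc2) (by intro x hx; simp at hx; omega)]
    · rw [if_neg hc, if_neg hc]
      rfl

-- each subtree yields at least once (its own prefix)
theorem pvGen_length_pos (lhs rhs : List Int) (f : Nat × List Int × List (Int × Int)) :
    1 ≤ (pvGen lhs rhs f).length := by
  obtain ⟨s, e, p⟩ := f
  simp only [pvGen, List.length_map]
  cases h : lhs.length with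
  | zero => simp [pvA_helper]
  | succ n => simp [pvA_helper]

-- (e) one pop step: a frame's subtree = its prefix, then its children's subtrees
theorem pvGen_step (lhs rhs : List Int) (start : Nat) (exc2 : List Int) (pre : List (Int × Int)) :
    pvGen lhs rhs (start, exc2, pre)
      = pre :: (pvB_children lhs rhs start exc2 pre).flatMap (pvGen lhs rhs) := by
  cases hL : lhs.length with
  | zero =>
    simp [pvGen, pvB_children, pvA_helper, hL]
  | succ L =>
    simp only [pvGen, pvB_children, hL, pvA_helper, List.map_cons, List.append_nil, List.map_flatMap, List.flatMap_assoc]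
    congr 1
    apply List.flatMap_congr
    intro i _
    simp only [List.not_mem_nil, if_false, List.map_flatMap]
    apply List.flatMap_congr
    intro jd _
    by_cases hc : lhs.getD i 0 = jd.2 ∧ jd.1 ∉ exc2
    · rw [if_pos hc, if_pos hc,
          pvA_exc1_irrel lhs rhs L (i+1) [i] (jd.1 :: exc2) (by intro x hx; simp at hx; omega),
          pvA_fuel_stable lhs rhs L lhs.length (i+1) [] (jd.1 :: exc2) (by omega) (by omega)]
      simp only [List.flatMap_cons, List.flatMap_nil, List.append_nil, pvGen, List.map_map]
      apply List.map_congr_left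
      intro m _
      simp
    · rw [if_neg hc, if_neg hc]
      simp

-- (c) the stack machine with sufficient fuel flattens the frames' subtrees in order
theorem pvB_run_eq_flatMap (lhs rhs : List Int) :
    ∀ (fuel : Nat) (stack : List (Nat × List Int × List (Int × Int))),
      (stack.map (fun f => (pvGen lhs rhs f).length)).sum ≤ fuel →
      pvB_run lhs rhs fuel stack = stack.flatMap (pvGen lhs rhs) := by
  intro fuel
  induction fuel with
  | zero =>
    intro stack h
    cases stack with
    | nil => rfl
    | cons f rest =>
      exfalso
      have := pvGen_length_pos lhs rhs f
      simp only [List.map_cons, List.sum_cons, Nat.le_zero] at h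
      omega
  | succ fuel ih =>
    intro stack h
    cases stack with
    | nil => rfl
    | cons f rest =>
      obtain ⟨s, e, p⟩ := f
      simp only [pvB_run]
      have hstep := pvGen_step lhs rhs s e p
      have hlen : (pvGen lhs rhs (s, e, p)).length
          = 1 + ((pvB_children lhs rhs s e p).map (fun f => (pvGen lhs rhs f).length)).sum := by
        rw [hstep]; simp [List.length_flatMap]; omega
      have hfuel : (((pvB_children lhs rhs s e p) ++ rest).map
          (fun f => (pvGen lhs rhs f).length)).sum ≤ fuel := by
        simp only [List.map_append, List.sum_append]
        simp only [List.map_cons, List.sum_cons] at h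
        omega
      rw [ih _ hfuel, List.flatMap_append, List.flatMap_cons, hstep]
      rfl

-- ===== VERDICT (by name: the statement is the Claim_ definition above) =====
theorem axis_matchings_spec : Claim_equal_axis_matchings := by
  intro lhs rhs _
  unfold Spec_axis_matchings axis_matchings axis_matchings_alt
  have hfuel : ([((0 : Nat), ([] : List Int), ([] : List (Int × Int)))].map
      (fun f => (pvGen lhs rhs f).length)).sum = pvB_size lhs rhs lhs.length 0 [] := by
    simp [pvGen, pvB_size_eq_length]
  rw [pvB_run_eq_flatMap lhs rhs _ _ (le_of_eq hfuel)]
  simp [pvGen]
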